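-- pv_equiv track=rewrite | github.com/blzzua/codewars | 6-kyu/simple_fun_46_cipher26.py | cipher26
-- ===== SOURCE A (Python) =====
-- from string import ascii_lowercase as al
--
-- def cipher26(message):
--     res = ''
--     prevsum = 0
--     for letter in message:
--         i = al.index(letter)
--         d = (i - prevsum) % 26
--         res = res + al[d]
--         prevsum = (prevsum + d) % 26
--     return res
-- ===== SOURCE B (Python) =====
-- from string import ascii_lowercase as al
--
-- def cipher26(message):
--     # prevsum in the original always equals the previous letter's index (start 0),
--     # so the running accumulator disappears: index table, then consecutive-pair pass.
--     idx = [al.index(c) for c in message]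
--     prev = [0] + idx[:-1]
--     return ''.join(al[(i - p) % 26] for i, p in zip(idx, prev))
-- ===== Notes on version B (the rewrite author's own statement) =====
-- stated objective: simpler
-- what changed: Uses the invariant that the running shift always equals the previous letter's index, replacing the stateful accumulator loop by an index-table pass plus a consecutive-pair (zip) pass.
import Mathlib
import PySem

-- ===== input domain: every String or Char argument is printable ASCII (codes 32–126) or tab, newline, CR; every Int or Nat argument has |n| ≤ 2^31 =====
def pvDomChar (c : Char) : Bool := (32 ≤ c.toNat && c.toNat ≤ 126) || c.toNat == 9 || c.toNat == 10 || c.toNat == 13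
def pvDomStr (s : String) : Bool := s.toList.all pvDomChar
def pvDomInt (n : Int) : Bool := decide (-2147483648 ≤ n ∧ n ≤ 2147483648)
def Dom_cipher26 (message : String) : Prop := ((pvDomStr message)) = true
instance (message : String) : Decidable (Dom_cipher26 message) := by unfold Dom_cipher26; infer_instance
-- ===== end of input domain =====

-- B removes A's running-sum accumulator via the invariant prevsum = previous letter's index: an
-- index-table pass plus a consecutive-pair (zip) pass; simpler decomposition, same O(n) cost.


-- the constant `al = ascii_lowercase`
def alChars : List Char := "abcdefghijklmnopqrstuvwxyz".toList

-- ===== PORT A =====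
-- loop state: (res as List Char, prevsum); `al.index(letter)` = PySem.List.index? (none = ValueError,
-- excluded by Pre_, totalised with getD 0); `al[d]` = PySem.List.pyGet? (d is always in range here).
def cipher26 (message : String) : String :=
  let st := message.toList.foldl
    (fun (st : List Char × Int) letter =>
      let i : Int := ((PySem.List.index? alChars letter).getD 0 : Nat)
      let d : Int := PySem.Int.mod (i - st.2) 26
      (st.1 ++ [(PySem.List.pyGet? alChars d).getD ' '], PySem.Int.mod (st.2 + d) 26))
    ([], 0)
  String.mk st.1

-- ===== PORT B =====
-- Source B: idx table, prev = [0] + idx[:-1], join over zip(idx, prev)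
def cipher26_alt (message : String) : String :=
  let idx : List Int := message.toList.map (fun c => ((PySem.List.index? alChars c).getD 0 : Nat))
  let prev : List Int := 0 :: idx.dropLast
  String.mk ((idx.zip prev).map
    (fun ip => (PySem.List.pyGet? alChars (PySem.Int.mod (ip.1 - ip.2) 26)).getD ' '))

-- ===== PRECONDITION & SPEC =====
-- Pre_ excludes exactly the inputs with a character outside a-z, on which A's `al.index` raises ValueError.
def Pre_cipher26 (message : String) : Prop := message.toList.all (fun c => alChars.contains c) = true
instance (message : String) : Decidable (Pre_cipher26 message) := by unfold Pre_cipher26; infer_instance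
def pvWitness_cipher26 : String := "taxi"
def Spec_cipher26 (message : String) (out : String) : Prop := out = cipher26_alt message
instance (message : String) (out : String) : Decidable (Spec_cipher26 message out) := by unfold Spec_cipher26; infer_instance

-- ===== CLAIM =====
def Claim_equal_cipher26 : Prop := ∀ (message : String), Dom_cipher26 message → Pre_cipher26 message → Spec_cipher26 message (cipher26 message)

-- ===== LEMMAS AND PROOFS =====

-- zip only looks at the first |xs| entries of the second list
theorem zip_cons_dropLast (xs : List Int) (p : Int) :
    xs.zip (p :: xs.dropLast) = xs.zip (p :: xs) := by
  induction xs generalizing p with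
  | nil => rfl
  | cons x t ih =>
    cases t with
    | nil => rfl
    | cons y u =>
      simp only [List.dropLast_cons₂, List.zip_cons_cons]
      exact congrArg _ (ih x)

theorem idx_lt (c : Char) (hc : c ∈ alChars) :
    ((PySem.List.index? alChars c).getD 0) < 26 := by
  rcases (PySem.List.index?_isSome_iff (xs := alChars) (v := c)).2 hc with h
  rcases Option.isSome_iff_exists.1 h with ⟨k, hk⟩
  rcases PySem.List.getElem_of_index?_eq_some hk with ⟨hlt, _, _⟩
  rw [hk, Option.getD_some]
  have : alChars.length = 26 := by decide
  omega

-- A's loop from state (res, p) appends B's pair-pass output seeded with previous index p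
theorem loop_eq (l : List Char) (hl : ∀ c ∈ l, c ∈ alChars) (res : List Char) (p : Int) :
    (l.foldl
      (fun (st : List Char × Int) letter =>
        let i : Int := ((PySem.List.index? alChars letter).getD 0 : Nat)
        let d : Int := PySem.Int.mod (i - st.2) 26
        (st.1 ++ [(PySem.List.pyGet? alChars d).getD ' '], PySem.Int.mod (st.2 + d) 26))
      (res, p)).1
    = res ++
      (((l.map (fun c => (((PySem.List.index? alChars c).getD 0 : Nat) : Int))).zip
        (p :: l.map (fun c => (((PySem.List.index? alChars c).getD 0 : Nat) : Int)))).map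
        (fun ip => (PySem.List.pyGet? alChars (PySem.Int.mod (ip.1 - ip.2) 26)).getD ' ')) := by
  induction l generalizing res p with
  | nil => simp
  | cons c t ih =>
    have hc : c ∈ alChars := hl c (List.mem_cons_self ..)
    have ht : ∀ x ∈ t, x ∈ alChars := fun x hx => hl x (List.mem_cons_of_mem _ hx)
    simp only [List.foldl_cons, List.map_cons, List.zip_cons_cons, List.map_cons]
    rw [ih ht]
    have hi : (0 : Int) ≤ (((PySem.List.index? alChars c).getD 0 : Nat) : Int) := by positivity
    have hlt : (((PySem.List.index? alChars c).getD 0 : Nat) : Int) < 26 := by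
      exact_mod_cast idx_lt c hc
    have hmod : PySem.Int.mod
        (p + PySem.Int.mod ((((PySem.List.index? alChars c).getD 0 : Nat) : Int) - p) 26) 26
        = (((PySem.List.index? alChars c).getD 0 : Nat) : Int) := by
      rw [PySem.Int.mod_eq_emod_of_pos (by norm_num), PySem.Int.mod_eq_emod_of_pos (by norm_num)]
      omega
    rw [hmod]
    simp

-- ===== VERDICT =====
theorem cipher26_spec : Claim_equal_cipher26 := by
  intro message _ hpre
  show cipher26 message = cipher26_alt message
  unfold cipher26 cipher26_alt
  simp only [zip_cons_dropLast]
  have hpre' : ∀ c ∈ message.toList, c ∈ alChars := by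
    intro c hc
    have := List.all_eq_true.1 hpre c hc
    simpa [List.contains_iff_mem] using this
  rw [loop_eq message.toList hpre' [] 0]
  simp
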